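-- pv_equiv track=rewrite | github.com/golker16/acordes-beatmakingversion | app.py | allowed_scale_pcs
-- ===== SOURCE A (Python) =====
-- NOTE_PC = {"C":0,"C#":1,"D":2,"D#":3,"E":4,"F":5,"F#":6,"G":7,"G#":8,"A":9,"A#":10,"B":11}
--
-- MAJOR_PCS     = [0,2,4,5,7,9,11]
--
-- NATMIN_PCS    = [0,2,3,5,7,8,10]
--
-- HARMONIC_PCS  = [0,2,3,5,7,8,11]
--
-- def allowed_scale_pcs(tonic: str, mode: str) -> set:
--     tonic_pc = NOTE_PC[tonic]
--     mode = mode.lower()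
--     if mode in ("major", "ionian", "mayor"):
--         pcs = MAJOR_PCS
--     elif mode in ("minor_harmonic", "harmonic_minor"):
--         pcs = HARMONIC_PCS
--     else:
--         pcs = NATMIN_PCS
--     return {(tonic_pc + x) % 12 for x in pcs}
-- ===== SOURCE B (Python) =====
-- NOTE_PC = {"C":0,"C#":1,"D":2,"D#":3,"E":4,"F":5,"F#":6,"G":7,"G#":8,"A":9,"A#":10,"B":11}
--
-- MAJOR_STEPS   = [2,2,1,2,2,2]
-- NATMIN_STEPS  = [2,1,2,2,1,2]
-- HARM_STEPS    = [2,1,2,2,1,3]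
--
-- def allowed_scale_pcs(tonic: str, mode: str) -> set:
--     acc = NOTE_PC[tonic]
--     mode = mode.lower()
--     if mode in ("major", "ionian", "mayor"):
--         steps = MAJOR_STEPS
--     elif mode in ("minor_harmonic", "harmonic_minor"):
--         steps = HARM_STEPS
--     else:
--         steps = NATMIN_STEPS
--     out = {acc % 12}
--     for s in steps:
--         acc += s
--         out.add(acc % 12)
--     return out
-- ===== Notes on version B (the rewrite author's own statement) =====
-- stated objective: alternative
-- what changed: B stores scales as consecutive step intervals and maintains a running pitch-class accumulator, adding each intermediate value to the set, instead of mapping a precomputed absolute-offset list.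
import Mathlib
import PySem

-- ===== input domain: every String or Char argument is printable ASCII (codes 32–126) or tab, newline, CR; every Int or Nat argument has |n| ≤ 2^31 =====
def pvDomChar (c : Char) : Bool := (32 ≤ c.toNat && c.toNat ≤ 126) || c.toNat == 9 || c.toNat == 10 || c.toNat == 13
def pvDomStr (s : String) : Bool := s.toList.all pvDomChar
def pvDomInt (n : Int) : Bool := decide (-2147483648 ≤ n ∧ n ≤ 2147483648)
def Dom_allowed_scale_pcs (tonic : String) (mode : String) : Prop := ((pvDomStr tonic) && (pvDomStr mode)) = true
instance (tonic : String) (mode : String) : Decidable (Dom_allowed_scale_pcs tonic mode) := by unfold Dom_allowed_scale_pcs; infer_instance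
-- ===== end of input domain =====

-- B replaces A's absolute-offset list map with a running-accumulator fold over step intervals (objective: alternative decomposition).

-- ===== PORT A =====
def notePC : PySem.Dict String Int :=
  PySem.Dict.ofList [("C",(0:Int)),("C#",1),("D",2),("D#",3),("E",4),("F",5),("F#",6),("G",7),("G#",8),("A",9),("A#",10),("B",11)]

def majorPCS : List Int := [0,2,4,5,7,9,11]
def natminPCS : List Int := [0,2,3,5,7,8,10]
def harmonicPCS : List Int := [0,2,3,5,7,8,11]

def allowed_scale_pcs (tonic : String) (mode : String) : List Int :=
  let tonic_pc : Int := (PySem.Dict.get? notePC tonic).getD 0  -- KeyError excluded by Pre_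
  let m := PySem.Str.lower mode
  let pcs :=
    if m = "major" ∨ m = "ionian" ∨ m = "mayor" then majorPCS
    else if m = "minor_harmonic" ∨ m = "harmonic_minor" then harmonicPCS
    else natminPCS
  PySem.Set.ofList (pcs.map (fun x => PySem.Int.mod (tonic_pc + x) 12))

-- ===== PORT B =====
def majorSteps : List Int := [2,2,1,2,2,2]
def natminSteps : List Int := [2,1,2,2,1,2]
def harmSteps : List Int := [2,1,2,2,1,3]

def allowed_scale_pcs_alt (tonic : String) (mode : String) : List Int :=
  let acc0 : Int := (PySem.Dict.get? notePC tonic).getD 0  -- KeyError excluded by Pre_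
  let m := PySem.Str.lower mode
  let steps :=
    if m = "major" ∨ m = "ionian" ∨ m = "mayor" then majorSteps
    else if m = "minor_harmonic" ∨ m = "harmonic_minor" then harmSteps
    else natminSteps
  let init : PySem.Set Int := PySem.Set.add PySem.Set.empty (PySem.Int.mod acc0 12)
  (steps.foldl (fun (st : Int × PySem.Set Int) s =>
      let acc := st.1 + s
      (acc, PySem.Set.add st.2 (PySem.Int.mod acc 12))) (acc0, init)).2

-- ===== PRECONDITION & SPEC =====
-- Pre_ excludes exactly the tonics not in NOTE_PC, on which A raises KeyError.
def Pre_allowed_scale_pcs (tonic : String) (mode : String) : Prop :=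
  tonic ∈ ["C","C#","D","D#","E","F","F#","G","G#","A","A#","B"]
instance (tonic : String) (mode : String) : Decidable (Pre_allowed_scale_pcs tonic mode) := by
  unfold Pre_allowed_scale_pcs; infer_instance
def pvWitness_allowed_scale_pcs : String × String := ("D", "Major")

def Spec_allowed_scale_pcs (tonic : String) (mode : String) (out : List Int) : Prop := out = allowed_scale_pcs_alt tonic mode
instance (tonic : String) (mode : String) (out : List Int) : Decidable (Spec_allowed_scale_pcs tonic mode out) := by unfold Spec_allowed_scale_pcs; infer_instance

-- ===== CLAIM (what is proved, stated in full; the proofs are below) =====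
def Claim_equal_allowed_scale_pcs : Prop := ∀ (tonic : String) (mode : String), Dom_allowed_scale_pcs tonic mode → Pre_allowed_scale_pcs tonic mode → Spec_allowed_scale_pcs tonic mode (allowed_scale_pcs tonic mode)

-- ===== LEMMAS AND PROOFS =====

-- With the tonic pitch class fixed to a literal t, the two ports agree whichever branch fires.
theorem ports_agree_of_pc (tonic mode : String) (t : Int)
    (ht : (PySem.Dict.get? notePC tonic).getD 0 = t)
    (hmaj : PySem.Set.ofList (majorPCS.map (fun x => PySem.Int.mod (t + x) 12)) =
      (majorSteps.foldl (fun (st : Int × PySem.Set Int) s =>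
        (st.1 + s, PySem.Set.add st.2 (PySem.Int.mod (st.1 + s) 12)))
        (t, PySem.Set.add PySem.Set.empty (PySem.Int.mod t 12))).2)
    (hharm : PySem.Set.ofList (harmonicPCS.map (fun x => PySem.Int.mod (t + x) 12)) =
      (harmSteps.foldl (fun (st : Int × PySem.Set Int) s =>
        (st.1 + s, PySem.Set.add st.2 (PySem.Int.mod (st.1 + s) 12)))
        (t, PySem.Set.add PySem.Set.empty (PySem.Int.mod t 12))).2)
    (hnat : PySem.Set.ofList (natminPCS.map (fun x => PySem.Int.mod (t + x) 12)) =
      (natminSteps.foldl (fun (st : Int × PySem.Set Int) s =>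
        (st.1 + s, PySem.Set.add st.2 (PySem.Int.mod (st.1 + s) 12)))
        (t, PySem.Set.add PySem.Set.empty (PySem.Int.mod t 12))).2) :
    allowed_scale_pcs tonic mode = allowed_scale_pcs_alt tonic mode := by
  unfold allowed_scale_pcs allowed_scale_pcs_alt
  rw [ht]
  by_cases h1 : PySem.Str.lower mode = "major" ∨ PySem.Str.lower mode = "ionian" ∨ PySem.Str.lower mode = "mayor"
  · simp only [if_pos h1]; exact hmaj
  · simp only [if_neg h1]
    by_cases h2 : PySem.Str.lower mode = "minor_harmonic" ∨ PySem.Str.lower mode = "harmonic_minor"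
    · simp only [if_pos h2]; exact hharm
    · simp only [if_neg h2]; exact hnat

-- ===== VERDICT (by name: the statement is the Claim_ definition above) =====
set_option maxHeartbeats 1000000 in
theorem allowed_scale_pcs_spec : Claim_equal_allowed_scale_pcs := by
  intro tonic mode _ hpre
  unfold Spec_allowed_scale_pcs
  unfold Pre_allowed_scale_pcs at hpre
  simp only [List.mem_cons, List.not_mem_nil, or_false] at hpre
  rcases hpre with h|h|h|h|h|h|h|h|h|h|h|h <;> subst h <;>
    refine ports_agree_of_pc _ mode _ rfl ?_ ?_ ?_ <;> decide
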